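-- pv_equiv track=rewrite | github.com/abu-kausar/POC-table-masking | utils/merge_texts.py | box_stats
-- ===== SOURCE A (Python) =====
-- def box_stats(box):
--     xs = [p[0] for p in box]
--     ys = [p[1] for p in box]
--
--     return {
--         "x_min": min(xs),
--         "x_max": max(xs),
--         "y_min": min(ys),
--         "y_max": max(ys),
--         "height": max(ys) - min(ys),
--     }
-- ===== SOURCE B (Python) =====
-- def box_stats(box):
--     x_min, y_min = box[0]
--     x_max, y_max = x_min, y_min
--     for x, y in box[1:]:
--         if x < x_min: x_min = x
--         if x > x_max: x_max = x
--         if y < y_min: y_min = y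
--         if y > y_max: y_max = y
--     return {
--         "x_min": x_min,
--         "x_max": x_max,
--         "y_min": y_min,
--         "y_max": y_max,
--         "height": y_max - y_min,
--     }
-- ===== Notes on version B (the rewrite author's own statement) =====
-- stated objective: simpler
-- what changed: Single pass over box maintaining four running min/max accumulators instead of building two projection lists and scanning them with four separate min/max calls (six passes).
import Mathlib
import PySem

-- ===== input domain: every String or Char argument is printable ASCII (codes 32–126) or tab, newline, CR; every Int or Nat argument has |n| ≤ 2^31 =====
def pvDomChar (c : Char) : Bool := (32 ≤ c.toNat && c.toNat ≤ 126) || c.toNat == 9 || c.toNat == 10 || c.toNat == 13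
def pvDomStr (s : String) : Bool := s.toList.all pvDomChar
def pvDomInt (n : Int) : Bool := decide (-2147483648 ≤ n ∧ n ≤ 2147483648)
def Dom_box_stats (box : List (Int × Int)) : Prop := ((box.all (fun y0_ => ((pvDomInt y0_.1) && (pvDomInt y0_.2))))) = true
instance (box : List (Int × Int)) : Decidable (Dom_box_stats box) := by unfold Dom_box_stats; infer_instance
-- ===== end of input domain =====

-- B replaces A's two projection lists and four separate min/max scans by one pass with
-- four running accumulators (objective: simpler/one pass; return value only, A mutates nothing).

-- ===== PORT A =====
-- min(xs)/max(xs) on the projected coordinate lists; none only when box = [] (ValueError, excluded by Pre_)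
def box_stats (box : List (Int × Int)) : List (String × Int) :=
  let xs := box.map (fun p => p.1)
  let ys := box.map (fun p => p.2)
  match PySem.List.min? xs (fun v => v), PySem.List.max? xs (fun v => v),
        PySem.List.min? ys (fun v => v), PySem.List.max? ys (fun v => v) with
  | some xmin, some xmax, some ymin, some ymax =>
      [("x_min", xmin), ("x_max", xmax), ("y_min", ymin), ("y_max", ymax),
       ("height", (PySem.List.max? ys (fun v => v)).getD 0 - (PySem.List.min? ys (fun v => v)).getD 0)]
  | _, _, _, _ => []

-- ===== PORT B =====
-- one fold over box[1:] updating (x_min, x_max, y_min, y_max), initialized from box[0]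
def box_stats_alt (box : List (Int × Int)) : List (String × Int) :=
  match box with
  | [] => []  -- box[0] raises IndexError in B; excluded by Pre_
  | (x0, y0) :: rest =>
      let st := rest.foldl
        (fun (s : Int × Int × Int × Int) (p : Int × Int) =>
          -- the four if-assignments of Source B are independent (each guards and updates its own variable)
          (if p.1 < s.1 then p.1 else s.1,
           if p.1 > s.2.1 then p.1 else s.2.1,
           if p.2 < s.2.2.1 then p.2 else s.2.2.1,
           if p.2 > s.2.2.2 then p.2 else s.2.2.2))
        (x0, x0, y0, y0)
      [("x_min", st.1), ("x_max", st.2.1), ("y_min", st.2.2.1), ("y_max", st.2.2.2),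
       ("height", st.2.2.2 - st.2.2.1)]

-- ===== PRECONDITION & SPEC =====
-- Pre_ excludes only the empty list, on which A raises ValueError (min of empty sequence).
def Pre_box_stats (box : List (Int × Int)) : Prop := box ≠ []
instance (box : List (Int × Int)) : Decidable (Pre_box_stats box) := by unfold Pre_box_stats; infer_instance
def pvWitness_box_stats : (List (Int × Int)) := [(1, 2), (3, -4)]

def Spec_box_stats (box : List (Int × Int)) (out : List (String × Int)) : Prop := out = box_stats_alt box
instance (box : List (Int × Int)) (out : List (String × Int)) : Decidable (Spec_box_stats box out) := by unfold Spec_box_stats; infer_instance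

-- ===== CLAIM (what is proved, stated in full; the proofs are below) =====
def Claim_equal_box_stats : Prop := ∀ (box : List (Int × Int)), Dom_box_stats box → Pre_box_stats box → Spec_box_stats box (box_stats box)

-- ===== LEMMAS AND PROOFS =====

theorem fold4_eq (rest : List (Int × Int)) (a b c d : Int) :
    rest.foldl
        (fun (s : Int × Int × Int × Int) (p : Int × Int) =>
          -- the four if-assignments of Source B are independent (each guards and updates its own variable)
          (if p.1 < s.1 then p.1 else s.1,
           if p.1 > s.2.1 then p.1 else s.2.1,
           if p.2 < s.2.2.1 then p.2 else s.2.2.1,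
           if p.2 > s.2.2.2 then p.2 else s.2.2.2))
        (a, b, c, d)
      = ((rest.map (fun p => p.1)).foldl min a, (rest.map (fun p => p.1)).foldl max b,
         (rest.map (fun p => p.2)).foldl min c, (rest.map (fun p => p.2)).foldl max d) := by
  induction rest generalizing a b c d with
  | nil => simp
  | cons p t ih =>
      have ha : (if p.1 < a then p.1 else a) = min a p.1 := by rw [min_def]; split_ifs <;> omega
      have hb : (if p.1 > b then p.1 else b) = max b p.1 := by rw [max_def]; split_ifs <;> omega
      have hc : (if p.2 < c then p.2 else c) = min c p.2 := by rw [min_def]; split_ifs <;> omega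
      have hd : (if p.2 > d then p.2 else d) = max d p.2 := by rw [max_def]; split_ifs <;> omega
      simp only [List.foldl_cons, List.map_cons, ha, hb, hc, hd, ih]

-- ===== VERDICT (by name: the statement is the Claim_ definition above) =====
theorem box_stats_spec : Claim_equal_box_stats := by
  intro box _ hpre
  unfold Spec_box_stats
  match box with
  | [] => exact absurd rfl hpre
  | (x0, y0) :: rest =>
      unfold box_stats box_stats_alt
      simp only [List.map_cons, PySem.List.min?_id_cons, PySem.List.max?_id_cons]
      simp only [fold4_eq, Option.getD_some]
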